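-- pv_equiv track=rewrite | github.com/qianlonghua/BioPIE | ner_utils/ner_doc.py | tokenize_sentence_space
-- ===== SOURCE A (Python) =====
-- def tokenize_sentence_space(sline):
--     tokens, locdict, j = [], {}, 0
--     for i, ch in enumerate(sline):
--         if ch.isspace():
--             if i > j:  tokens.append(sline[j:i])
--             j = i+1
--         else:
--             locdict[i] = len(tokens)
--     # the last token
--     if j < len(sline):  tokens.append(sline[j:])
--     offsets = [[100000, -1] for _, _ in enumerate(tokens)]
--     for i in locdict:
--         tno = locdict[i]    # tno
--         if i < offsets[tno][0]:  offsets[tno][0] = i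
--         if i > offsets[tno][1]:  offsets[tno][1] = i
--     return tokens, offsets, locdict,
-- ===== SOURCE B (Python) =====
-- def tokenize_sentence_space(sline):
--     # Single pass: tokens, char->token map, and per-token offset ranges as a
--     # running min/max reduction (sentinel-initialised), emitted when a token closes.
--     tokens, offsets, locdict = [], [], {}
--     start, lo, hi = 0, 100000, -1
--     for i, ch in enumerate(sline):
--         if ch.isspace():
--             if i > start:
--                 tokens.append(sline[start:i])
--                 offsets.append([lo, hi])
--                 lo, hi = 100000, -1
--             start = i + 1
--         else:
--             locdict[i] = len(tokens)
--             lo, hi = min(lo, i), max(hi, i)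
--     if start < len(sline):
--         tokens.append(sline[start:])
--         offsets.append([lo, hi])
--     return tokens, offsets, locdict
-- ===== Notes on version B (the rewrite author's own statement) =====
-- stated objective: simpler
-- what changed: B computes each token's [min,max] offset pair as a sentinel-initialised running min/max reduction inside the single tokenizing pass, emitted when the token closes, replacing A's preallocated offsets table and its separate min/max loop over locdict.
import Mathlib
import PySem

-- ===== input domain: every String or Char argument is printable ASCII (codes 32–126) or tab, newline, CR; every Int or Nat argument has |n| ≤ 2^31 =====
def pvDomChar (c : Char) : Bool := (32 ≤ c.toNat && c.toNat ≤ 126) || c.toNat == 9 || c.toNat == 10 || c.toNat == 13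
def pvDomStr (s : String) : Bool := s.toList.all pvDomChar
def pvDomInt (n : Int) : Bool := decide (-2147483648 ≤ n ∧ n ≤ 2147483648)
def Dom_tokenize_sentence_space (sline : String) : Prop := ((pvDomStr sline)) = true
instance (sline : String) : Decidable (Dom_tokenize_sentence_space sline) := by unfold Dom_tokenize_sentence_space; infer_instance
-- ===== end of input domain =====

-- B builds each token's offset pair as a running min/max reduction inside the single
-- tokenizing pass, where A runs a second loop over locdict into a preallocated table;
-- same return value.

-- ===== PORT A =====
-- one iteration of A's `for i, ch in enumerate(sline)` loop; state = (tokens, locdict, j)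
def pvAStep (cs : List Char) (st : List String × PySem.Dict Int Int × Int)
    (p : Int × Char) : List String × PySem.Dict Int Int × Int :=
  if PySem.Chars.isspace p.2 then
    ((if p.1 > st.2.2 then st.1 ++ [String.ofList (PySem.Chars.slice cs (some st.2.2) (some p.1))] else st.1),
     st.2.1, p.1 + 1)
  else
    (st.1, st.2.1.insert p.1 (st.1.length : Int), st.2.2)

-- one iteration of A's second loop: `if i < offsets[tno][0]: …; if i > offsets[tno][1]: …`
-- (in-place row write; exact whenever tno indexes offsets and the row has two cells, which A guarantees)
def pvAUpd (offs : List (List Int)) (i tno : Int) : List (List Int) :=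
  match PySem.List.pyIdx? offs.length tno with
  | none => offs
  | some k =>
    match offs[k]? with
    | some (lo :: hi :: rest) =>
        offs.set k ((if i < lo then i else lo) :: (if i > hi then i else hi) :: rest)
    | _ => offs

def tokenize_sentence_space (sline : String) : List String × List (List Int) × (List (Int × Int)) :=
  let cs := sline.toList
  let st := (PySem.List.enumerate cs 0).foldl (pvAStep cs) ([], PySem.Dict.empty, 0)
  -- the last token
  let tokens := if st.2.2 < (cs.length : Int)
    then st.1 ++ [String.ofList (PySem.Chars.slice cs (some st.2.2) none)] else st.1
  let locdict := st.2.1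
  let offsets0 := tokens.map (fun _ => ([100000, -1] : List Int))
  -- `for i in locdict: tno = locdict[i]; …`  (i is a key, so the lookup cannot fail; getD 0 is exact)
  let offsets := locdict.keys.foldl (fun offs i => pvAUpd offs i ((locdict.get? i).getD 0)) offsets0
  (tokens, offsets, locdict.items)

-- ===== PORT B =====
-- one iteration of B's single loop; state = (tokens, offsets, locdict, start, lo, hi)
def pvBStep (cs : List Char) (st : List String × List (List Int) × PySem.Dict Int Int × Int × Int × Int)
    (p : Int × Char) : List String × List (List Int) × PySem.Dict Int Int × Int × Int × Int :=
  if PySem.Chars.isspace p.2 then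
    if p.1 > st.2.2.2.1 then
      (st.1 ++ [String.ofList (PySem.Chars.slice cs (some st.2.2.2.1) (some p.1))],
       st.2.1 ++ [[st.2.2.2.2.1, st.2.2.2.2.2]], st.2.2.1, p.1 + 1, 100000, -1)
    else (st.1, st.2.1, st.2.2.1, p.1 + 1, st.2.2.2.2.1, st.2.2.2.2.2)
  else (st.1, st.2.1, st.2.2.1.insert p.1 (st.1.length : Int), st.2.2.2.1,
        min st.2.2.2.2.1 p.1, max st.2.2.2.2.2 p.1)

def tokenize_sentence_space_alt (sline : String) : List String × List (List Int) × (List (Int × Int)) :=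
  let cs := sline.toList
  let st := (PySem.List.enumerate cs 0).foldl (pvBStep cs) ([], [], PySem.Dict.empty, 0, 100000, -1)
  if st.2.2.2.1 < (cs.length : Int) then
    (st.1 ++ [String.ofList (PySem.Chars.slice cs (some st.2.2.2.1) none)],
     st.2.1 ++ [[st.2.2.2.2.1, st.2.2.2.2.2]], st.2.2.1.items)
  else (st.1, st.2.1, st.2.2.1.items)

-- ===== PRECONDITION & SPEC =====
def Spec_tokenize_sentence_space (sline : String) (out : List String × List (List Int) × (List (Int × Int))) : Prop := out = tokenize_sentence_space_alt sline
instance (sline : String) (out : List String × List (List Int) × (List (Int × Int))) : Decidable (Spec_tokenize_sentence_space sline out) := by unfold Spec_tokenize_sentence_space; infer_instance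

-- ===== CLAIM (what is proved, stated in full; the proofs are below) =====
def Claim_equal_tokenize_sentence_space : Prop := ∀ (sline : String), Dom_tokenize_sentence_space sline → Spec_tokenize_sentence_space sline (tokenize_sentence_space sline)

-- ===== LEMMAS AND PROOFS =====
theorem pvAUpd_self_len (offs : List (List Int)) (i : Int) :
    pvAUpd offs i ((offs.length : Nat) : Int) = offs := by
  simp [pvAUpd, PySem.List.pyIdx?]

theorem pvAUpd_append_head (offs : List (List Int)) (i lo hi : Int) (rest : List (List Int)) :
    pvAUpd (offs ++ [lo, hi] :: rest) i ((offs.length : Nat) : Int)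
      = offs ++ [if i < lo then i else lo, if i > hi then i else hi] :: rest := by
  have h1 : PySem.List.pyIdx? (offs ++ [lo, hi] :: rest).length ((offs.length : Nat) : Int)
      = some offs.length := by simp [PySem.List.pyIdx?]
  have h2 : (offs ++ [lo, hi] :: rest)[offs.length]? = some [lo, hi] := by
    rw [List.getElem?_append_right (le_refl _)]; simp
  rw [pvAUpd, h1]
  simp only [h2, List.set_append]
  simp

def pvStep2 (offs : List (List Int)) (p : Int × Int) : List (List Int) := pvAUpd offs p.1 p.2

-- updates whose token number indexes `init` act on `init` alone; the appended tail rides along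
theorem pvAUpd_extend (init extra : List (List Int)) (i t : Int)
    (h0 : 0 ≤ t) (h1 : t < (init.length : Int)) :
    pvAUpd (init ++ extra) i t = pvAUpd init i t ++ extra
      ∧ (pvAUpd init i t).length = init.length := by
  have hidx : ∀ n : Nat, (init.length : Int) ≤ (n : Int) →
      PySem.List.pyIdx? n t = some t.toNat := by
    intro n hn
    unfold PySem.List.pyIdx?
    rw [if_pos h0, if_pos (by omega)]
  have hk : t.toNat < init.length := by omega
  have e1 : PySem.List.pyIdx? (init.length + extra.length) t = some t.toNat := by
    have := hidx (init.length + extra.length) (by push_cast; omega)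
    simpa using this
  have e2 : PySem.List.pyIdx? init.length t = some t.toNat := hidx _ (le_refl _)
  have hget : (init ++ extra)[t.toNat]? = init[t.toNat]? := by
    rw [List.getElem?_append_left hk]
  cases hrow : init[t.toNat]? with
  | none => simp [pvAUpd, e1, e2, hget, hrow]
  | some row =>
    match row with
    | [] => simp [pvAUpd, e1, e2, hget, hrow]
    | [x] => simp [pvAUpd, e1, e2, hget, hrow]
    | lo :: hi :: rest =>
        refine ⟨?_, by simp [pvAUpd, e2, hrow]⟩
        simp only [pvAUpd, List.length_append, e1, e2, hget, hrow]
        rw [List.set_append_left _ _ hk]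

theorem pvFold_extend (items : List (Int × Int)) (init extra : List (List Int))
    (h : ∀ p ∈ items, 0 ≤ p.2 ∧ p.2 < (init.length : Int)) :
    items.foldl pvStep2 (init ++ extra) = items.foldl pvStep2 init ++ extra := by
  induction items generalizing init with
  | nil => rfl
  | cons p ps ih =>
      have hp := h p (by simp)
      obtain ⟨heq, hlen⟩ := pvAUpd_extend init extra p.1 p.2 hp.1 hp.2
      simp only [List.foldl_cons, pvStep2, heq]
      exact ih (pvAUpd init p.1 p.2) (by intro q hq; rw [hlen]; exact h q (by simp [hq]))

-- the loop invariant for B's single pass after the first s characters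
def pvInv (s : Nat) (st : List String × List (List Int) × PySem.Dict Int Int × Int × Int × Int) : Prop :=
  ∃ jn : Nat, st.2.2.2.1 = (jn : Int) ∧ jn ≤ s ∧
    st.1.length = st.2.1.length ∧
    st.2.2.1.keys.Nodup ∧
    (∀ p ∈ st.2.2.1.items, ∃ k : Nat, p.1 = (k : Int) ∧ k < s) ∧
    (∀ p ∈ st.2.2.1.items, 0 ≤ p.2 ∧ p.2 ≤ (st.2.1.length : Int)) ∧
    st.2.2.1.items.foldl pvStep2 (List.replicate st.2.1.length ([100000, -1] : List Int))
      = st.2.1 ∧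
    st.2.2.1.items.foldl pvStep2
        (List.replicate st.2.1.length ([100000, -1] : List Int) ++ [[100000, -1]])
      = st.2.1 ++ [[st.2.2.2.2.1, st.2.2.2.2.2]]

theorem pvInv_step (cs : List Char) (s : Nat) (c : Char)
    (st : List String × List (List Int) × PySem.Dict Int Int × Int × Int × Int)
    (h : pvInv s st) : pvInv (s + 1) (pvBStep cs st ((s : Int), c)) := by
  obtain ⟨toks, offs, ld, j, lo, hi⟩ := st
  obtain ⟨jn, hj, hjs, hlen, hnd, hkeys, hrng, hclosed, hopen⟩ := h
  simp only at hj hlen hnd hkeys hrng hclosed hopen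
  subst hj
  by_cases hsp : PySem.Chars.isspace c
  · by_cases hlt : jn < s
    · have hB : pvBStep cs (toks, offs, ld, ((jn : Nat) : Int), lo, hi) ((s : Int), c)
          = (toks ++ [String.ofList (PySem.Chars.slice cs (some ((jn : Nat) : Int)) (some (s : Int)))],
             offs ++ [[lo, hi]], ld, (s : Int) + 1, 100000, -1) := by
        simp [pvBStep, hsp]
        omega
      rw [hB]
      refine ⟨s + 1, by push_cast; ring, le_refl _, by simp [hlen], hnd,
        fun p hp => by obtain ⟨k, hk1, hk2⟩ := hkeys p hp; exact ⟨k, hk1, by omega⟩,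
        fun p hp => ⟨(hrng p hp).1, by
          have h2 := (hrng p hp).2
          simp only [List.length_append, List.length_cons, List.length_nil]
          push_cast
          omega⟩, ?_, ?_⟩
      · -- closed clause for the new offsets
        simp only [List.length_append, List.length_cons, List.length_nil, Nat.zero_add]
        rw [List.replicate_succ']
        exact hopen
      · -- open clause: the extra fresh row rides through untouched
        simp only [List.length_append, List.length_cons, List.length_nil, Nat.zero_add]
        rw [List.replicate_succ']
        rw [pvFold_extend ld.items _ [[100000, -1]]
            (by intro p hp; have := hrng p hp
                constructor
                · exact this.1
                · simp only [List.length_append, List.length_replicate, List.length_cons,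
                    List.length_nil, Nat.zero_add]
                  push_cast
                  omega)]
        rw [hopen]
    · have hje : jn = s := by omega
      subst hje
      have hB : pvBStep cs (toks, offs, ld, ((jn : Nat) : Int), lo, hi) (((jn : Nat) : Int), c)
          = (toks, offs, ld, ((jn : Nat) : Int) + 1, lo, hi) := by
        simp [pvBStep, hsp]
      rw [hB]
      exact ⟨jn + 1, by push_cast; ring, by omega, hlen, hnd,
        fun p hp => by obtain ⟨k, hk1, hk2⟩ := hkeys p hp; exact ⟨k, hk1, by omega⟩,
        hrng, hclosed, hopen⟩
  · have hB : pvBStep cs (toks, offs, ld, ((jn : Nat) : Int), lo, hi) ((s : Int), c)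
        = (toks, offs, ld.insert ((s : Int)) (toks.length : Int), ((jn : Nat) : Int),
           min lo (s : Int), max hi (s : Int)) := by
      simp [pvBStep, hsp]
    rw [hB]
    have hcont : ld.contains ((s : Int)) = false := by
      by_contra hc
      have hct : ld.contains ((s : Int)) = true := by
        cases hx : ld.contains ((s : Int)) <;> simp_all
      have hmem := (PySem.Dict.contains_iff_mem_keys ld _).mp hct
      have hmem' : ((s : Int)) ∈ ld.items.map (·.1) := by
        simpa [PySem.Dict.keys] using hmem
      obtain ⟨p, hp, hp1⟩ := List.mem_map.mp hmem'
      obtain ⟨k, hk1, hk2⟩ := hkeys p hp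
      rw [hk1] at hp1
      omega
    have hitems : (ld.insert ((s : Int)) (toks.length : Int)).items
        = ld.items ++ [(((s : Int)), (toks.length : Int))] :=
      PySem.Dict.items_insert_of_not_contains ld _ hcont
    have hkeys' : (ld.insert ((s : Int)) (toks.length : Int)).keys = ld.keys ++ [((s : Int))] :=
      PySem.Dict.keys_insert_of_not_contains ld _ hcont
    refine ⟨jn, rfl, by omega, hlen, ?_, ?_, ?_, ?_, ?_⟩
    · rw [hkeys']
      refine List.Nodup.append hnd (List.nodup_singleton _) ?_
      intro x hx hx2
      simp only [List.mem_singleton] at hx2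
      subst hx2
      have hmem' : ((s : Int)) ∈ ld.items.map (·.1) := by simpa [PySem.Dict.keys] using hx
      obtain ⟨p, hp, hp1⟩ := List.mem_map.mp hmem'
      obtain ⟨k, hk1, hk2⟩ := hkeys p hp
      rw [hk1] at hp1; omega
    · intro p hp
      rw [hitems] at hp
      rcases List.mem_append.mp hp with hp | hp
      · obtain ⟨k, hk1, hk2⟩ := hkeys p hp; exact ⟨k, hk1, by omega⟩
      · simp only [List.mem_singleton] at hp; exact ⟨s, by simp [hp], by omega⟩
    · intro p hp
      rw [hitems] at hp
      rcases List.mem_append.mp hp with hp | hp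
      · exact hrng p hp
      · simp only [List.mem_singleton] at hp
        subst hp
        constructor
        · simp
        · simp [hlen]
    · rw [hitems, List.foldl_append]
      simp only [List.foldl_cons, List.foldl_nil, hclosed]
      show pvAUpd offs (s : Int) (toks.length : Int) = offs
      rw [show ((toks.length : Nat) : Int) = ((offs.length : Nat) : Int) by exact_mod_cast hlen]
      exact pvAUpd_self_len offs _
    · rw [hitems, List.foldl_append]
      simp only [List.foldl_cons, List.foldl_nil, hopen]
      show pvAUpd (offs ++ [[lo, hi]]) (s : Int) (toks.length : Int) = _
      rw [show ((toks.length : Nat) : Int) = ((offs.length : Nat) : Int) by exact_mod_cast hlen]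
      rw [show ([[lo, hi]] : List (List Int)) = ([lo, hi] : List Int) :: [] from rfl,
          pvAUpd_append_head,
          show (if (s : Int) < lo then (s : Int) else lo) = min lo (s : Int) from by
            split_ifs <;> omega,
          show (if (s : Int) > hi then (s : Int) else hi) = max hi (s : Int) from by
            split_ifs <;> omega]

def pvProj (st : List String × List (List Int) × PySem.Dict Int Int × Int × Int × Int) :
    List String × PySem.Dict Int Int × Int := (st.1, st.2.2.1, st.2.2.2.1)

theorem pvProj_step (cs : List Char)
    (st : List String × List (List Int) × PySem.Dict Int Int × Int × Int × Int)
    (p : Int × Char) : pvAStep cs (pvProj st) p = pvProj (pvBStep cs st p) := by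
  simp only [pvAStep, pvBStep, pvProj]
  split_ifs <;> simp_all

theorem pvProj_foldl (cs : List Char) (ps : List (Int × Char))
    (st : List String × List (List Int) × PySem.Dict Int Int × Int × Int × Int) :
    ps.foldl (pvAStep cs) (pvProj st) = pvProj (ps.foldl (pvBStep cs) st) := by
  induction ps generalizing st with
  | nil => rfl
  | cons p ps ih => simp only [List.foldl_cons, pvProj_step, ih]

theorem pvInv_foldl (cs : List Char) (ds : List Char) (s : Nat)
    (st : List String × List (List Int) × PySem.Dict Int Int × Int × Int × Int)
    (h : pvInv s st) :
    pvInv (s + ds.length) ((PySem.List.enumerate ds (s : Int)).foldl (pvBStep cs) st) := by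
  induction ds generalizing s st with
  | nil => simpa using h
  | cons d ds ih =>
      have h1 := pvInv_step cs s d st h
      have h2 := ih (s + 1) _ h1
      rw [PySem.List.enumerate_cons, List.foldl_cons]
      have : ((s : Int) + 1) = ((s + 1 : Nat) : Int) := by push_cast; ring
      rw [this]
      simpa [Nat.add_assoc, Nat.add_comm 1 ds.length] using h2

theorem pvMapConst {α : Type} (l : List α) (b : List Int) :
    l.map (fun _ => b) = List.replicate l.length b := by
  induction l with
  | nil => rfl
  | cons x xs ih => simp [ih, List.replicate_succ]

theorem tokenize_sentence_space_spec' (sline : String) :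
    tokenize_sentence_space sline = tokenize_sentence_space_alt sline := by
  simp only [tokenize_sentence_space, tokenize_sentence_space_alt]
  have h0 : pvInv 0 (([] : List String), ([] : List (List Int)),
      (PySem.Dict.empty : PySem.Dict Int Int), (0 : Int), (100000 : Int), (-1 : Int)) := by
    exact ⟨0, rfl, le_refl 0, rfl, by simp [PySem.Dict.keys, PySem.Dict.empty],
      by simp [PySem.Dict.empty], by simp [PySem.Dict.empty], by simp [PySem.Dict.empty],
      by simp [PySem.Dict.empty]⟩
  have hinv := pvInv_foldl sline.toList sline.toList 0 _ h0
  rw [Nat.zero_add] at hinv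
  simp only [Nat.cast_zero] at hinv
  have hproj := pvProj_foldl sline.toList (PySem.List.enumerate sline.toList 0)
    (([] : List String), ([] : List (List Int)), (PySem.Dict.empty : PySem.Dict Int Int),
     (0 : Int), (100000 : Int), (-1 : Int))
  have hpi : pvProj (([] : List String), ([] : List (List Int)),
      (PySem.Dict.empty : PySem.Dict Int Int), (0 : Int), (100000 : Int), (-1 : Int))
      = (([] : List String), (PySem.Dict.empty : PySem.Dict Int Int), (0 : Int)) := rfl
  rw [hpi] at hproj
  rw [hproj]
  generalize hG : (PySem.List.enumerate sline.toList 0).foldl (pvBStep sline.toList)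
      (([] : List String), ([] : List (List Int)), (PySem.Dict.empty : PySem.Dict Int Int),
       (0 : Int), (100000 : Int), (-1 : Int)) = stB at hinv ⊢
  obtain ⟨toks, offs, ld, j, lo, hi⟩ := stB
  obtain ⟨jn, hj, hjs, hlen, hnd, hkeys, hrng, hclosed, hopen⟩ := hinv
  simp only at hj hjs hlen hnd hkeys hrng hclosed hopen
  subst hj
  simp only [pvProj]
  have hfoldA : ∀ init : List (List Int), ld.keys.foldl (fun o i => pvAUpd o i ((ld.get? i).getD 0)) init
      = ld.items.foldl pvStep2 init := by
    intro init
    rw [PySem.Dict.items_eq_map_keys ld hnd 0, List.foldl_map]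
    simp only [pvStep2, PySem.Dict.getD_eq_get?_getD]
  by_cases hop : jn < sline.toList.length
  · rw [if_pos (show ((jn : Nat) : Int) < (sline.toList.length : Int) by exact_mod_cast hop),
        if_pos (show ((jn : Nat) : Int) < (sline.toList.length : Int) by exact_mod_cast hop)]
    simp only [Prod.mk.injEq]
    refine ⟨by trivial, ?_, by trivial⟩
    rw [hfoldA, pvMapConst]
    simp only [List.length_append, List.length_cons, List.length_nil, Nat.zero_add, hlen]
    rw [List.replicate_succ']
    exact hopen
  · have hje : jn = sline.toList.length := by omega
    rw [if_neg (show ¬ ((jn : Nat) : Int) < (sline.toList.length : Int) by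
          rw [hje]; omega),
        if_neg (show ¬ ((jn : Nat) : Int) < (sline.toList.length : Int) by
          rw [hje]; omega)]
    simp only [Prod.mk.injEq]
    refine ⟨by trivial, ?_, by trivial⟩
    rw [hfoldA, pvMapConst, hlen]
    exact hclosed

-- ===== VERDICT (by name: the statement is the Claim_ definition above) =====
theorem tokenize_sentence_space_spec : Claim_equal_tokenize_sentence_space := by
  intro sline _
  exact tokenize_sentence_space_spec' sline
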